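-- pv_equiv track=rewrite | github.com/web-slate/python-basics | data_types/numeric/integer/iterations.py | find_digit_position
-- ===== SOURCE A (Python) =====
-- def find_digit_position(number, digit_to_find):
--     original_number = number
--     position = 1
--     while number >= 10:
--         if number % 10 == digit_to_find:
--             return len(str(original_number)) - position + 1
--         number //= 10
--         position += 1
--     # Check the last digit
--     return 1 if number == digit_to_find else -1
-- ===== SOURCE B (Python) =====
-- def find_digit_position(number, digit_to_find):
--     if number < 10:
--         return 1 if number == digit_to_find else -1
--     position = -1
--     for i, ch in enumerate(str(number)):
--         if int(ch) == digit_to_find: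
--             position = i + 1
--     return position
-- ===== Notes on version B (the rewrite author's own statement) =====
-- stated objective: idiomatic
-- what changed: Replaces the right-to-left arithmetic mod/floordiv digit-extraction loop with a left-to-right scan over str(number) that remembers the last matching index, keeping A's guard for numbers below 10.
import Mathlib
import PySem

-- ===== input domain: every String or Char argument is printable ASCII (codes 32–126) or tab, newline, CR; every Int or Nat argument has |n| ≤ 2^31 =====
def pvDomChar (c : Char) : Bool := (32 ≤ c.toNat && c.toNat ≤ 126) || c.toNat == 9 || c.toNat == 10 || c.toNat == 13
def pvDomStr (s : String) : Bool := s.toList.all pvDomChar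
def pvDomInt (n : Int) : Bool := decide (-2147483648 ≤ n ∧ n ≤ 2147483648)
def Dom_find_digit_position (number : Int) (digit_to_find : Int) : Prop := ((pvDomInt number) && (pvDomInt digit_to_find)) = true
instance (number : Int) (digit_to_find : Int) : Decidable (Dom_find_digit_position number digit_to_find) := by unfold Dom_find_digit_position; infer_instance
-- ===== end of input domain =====

-- B replaces A's right-to-left mod/floordiv digit extraction by a left-to-right scan of
-- str(number) remembering the last matching index (more idiomatic, same cost).

-- ===== PORT A =====
-- the `while number >= 10` loop of A, with `original_number` and `digit_to_find` carried along
def find_digit_position_loop (orig : Int) (d : Int) (number : Int) (position : Int) : Int :=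
  if h : 10 ≤ number then
    if PySem.Int.mod number 10 = d then
      PySem.Str.len (PySem.Int.toStr orig) - position + 1
    else
      find_digit_position_loop orig d (PySem.Int.floordiv number 10) (position + 1)
  else
    if number = d then 1 else -1
termination_by number.toNat
decreasing_by
  have h10 : PySem.Int.floordiv number 10 = number / 10 :=
    PySem.Int.floordiv_eq_ediv_of_pos (by omega)
  rw [h10]; omega

def find_digit_position (number : Int) (digit_to_find : Int) : Int :=
  find_digit_position_loop number digit_to_find number 1

-- ===== PORT B =====
-- `for i, ch in enumerate(str(number)):` tracking the last index with int(ch) == digit_to_find.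
-- int(ch) is ported as ch.toNat - 48: exact here, since str(number) for number ≥ 10
-- consists only of the digit characters '0'..'9'.
def find_digit_position_alt (number : Int) (digit_to_find : Int) : Int :=
  if number < 10 then
    if number = digit_to_find then 1 else -1
  else
    (PySem.List.enumerate (PySem.Int.toChars number) 0).foldl
      (fun pos ic => if ((ic.2.toNat : Int) - 48) = digit_to_find then ic.1 + 1 else pos) (-1)

-- ===== PRECONDITION & SPEC =====
def Spec_find_digit_position (number : Int) (digit_to_find : Int) (out : Int) : Prop := out = find_digit_position_alt number digit_to_find
instance (number : Int) (digit_to_find : Int) (out : Int) : Decidable (Spec_find_digit_position number digit_to_find out) := by unfold Spec_find_digit_position; infer_instance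

-- ===== CLAIM (what is proved, stated in full; the proofs are below) =====
def Claim_equal_find_digit_position : Prop := ∀ (number : Int) (digit_to_find : Int), Dom_find_digit_position number digit_to_find → Spec_find_digit_position number digit_to_find (find_digit_position number digit_to_find)

-- ===== LEMMAS AND PROOFS =====

-- proof-side decimal digit list: the structural recursion Nat.toDigits 10 actually follows
def decDigits (m : Nat) : List Char :=
  if m < 10 then [Nat.digitChar m]
  else decDigits (m / 10) ++ [Nat.digitChar (m % 10)]
termination_by m
decreasing_by exact Nat.div_lt_self (by omega) (by omega)

lemma toDigitsCore_eq_decDigits (f : Nat) : ∀ (m : Nat) (l : List Char),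
    m < 10 ^ (f + 1) → Nat.toDigitsCore 10 (f + 1) m l = decDigits m ++ l := by
  induction f with
  | zero =>
    intro m l hm
    have hlt : m < 10 := by simpa using hm
    have h0 : m / 10 = 0 := Nat.div_eq_of_lt hlt
    rw [decDigits]
    simp only [Nat.toDigitsCore, h0, if_pos, Nat.mod_eq_of_lt hlt, hlt]
    rfl
  | succ f ih =>
    intro m l hm
    rw [Nat.toDigitsCore]
    by_cases h0 : m / 10 = 0
    · have hlt : m < 10 := by omega
      rw [decDigits]
      simp [h0, Nat.mod_eq_of_lt hlt, hlt]
    · have hge : ¬ m < 10 := by omega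
      have hdiv : m / 10 < 10 ^ (f + 1) := by
        have hpow : 10 ^ (f + 1 + 1) = 10 ^ (f + 1) * 10 := by ring
        omega
      rw [ih (m / 10) _ hdiv]
      conv_rhs => rw [decDigits]
      simp [hge]

lemma toDigits_eq_decDigits (m : Nat) : Nat.toDigits 10 m = decDigits m := by
  have hm : m < 10 ^ (m + 1) := by
    calc m < 10 ^ m := Nat.lt_pow_self (by omega)
      _ ≤ 10 ^ (m + 1) := Nat.pow_le_pow_right (by omega) (by omega)
  have := toDigitsCore_eq_decDigits m m [] hm
  simpa [Nat.toDigits] using this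

lemma digitChar_val (k : Nat) (h : k < 10) : ((Nat.digitChar k).toNat : Int) - 48 = (k : Int) := by
  interval_cases k <;> decide

lemma enumerate_append {α : Type} (L M : List α) (s : Int) :
    PySem.List.enumerate (L ++ M) s
      = PySem.List.enumerate L s ++ PySem.List.enumerate M (s + L.length) := by
  induction L generalizing s with
  | nil => simp [PySem.List.enumerate_nil]
  | cons x xs ih =>
    simp only [List.cons_append, PySem.List.enumerate_cons, List.length_cons]
    rw [ih (s + 1)]
    have h : s + 1 + (xs.length : Int) = s + ((xs.length : Int) + 1) := by ring
    rw [h]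
    push_cast
    ring_nf

-- the accumulator loop of B, abbreviated for the proofs
def lastPos (L : List Char) (d : Int) : Int :=
  (PySem.List.enumerate L 0).foldl
    (fun pos ic => if ((ic.2.toNat : Int) - 48) = d then ic.1 + 1 else pos) (-1)

lemma lastPos_append_singleton (L : List Char) (c : Char) (d : Int) :
    lastPos (L ++ [c]) d
      = if ((c.toNat : Int) - 48) = d then (L.length : Int) + 1 else lastPos L d := by
  unfold lastPos
  rw [enumerate_append, List.foldl_append]
  simp [PySem.List.enumerate_cons, PySem.List.enumerate_nil]

-- A's loop, on a current value m ≥ 1 whose digits are the suffix of the original starting at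
-- `position`, returns exactly B's last-match scan of decDigits m
lemma loop_eq_lastPos (orig d : Int) : ∀ (m : Nat), 1 ≤ m → ∀ (pos : Int),
    PySem.Str.len (PySem.Int.toStr orig) = pos + ((decDigits m).length : Int) - 1 →
    find_digit_position_loop orig d (m : Int) pos = lastPos (decDigits m) d := by
  intro m
  induction m using Nat.strong_induction_on with
  | _ m ih =>
    intro hm pos hL
    rw [find_digit_position_loop]
    by_cases h10 : m < 10
    · have hnot : ¬ (10 : Int) ≤ (m : Int) := by omega
      rw [decDigits]
      simp only [h10, if_pos]
      have hv := digitChar_val m h10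
      simp only [hnot, dif_neg, not_false_iff, lastPos, PySem.List.enumerate_cons,
        PySem.List.enumerate_nil, List.foldl_cons, List.foldl_nil, hv]
      by_cases hd : (m : Int) = d
      · simp [hd]
      · simp [hd]
    · have hge : (10 : Int) ≤ (m : Int) := by omega
      have hmod : PySem.Int.mod (m : Int) 10 = ((m % 10 : Nat) : Int) := by
        exact_mod_cast PySem.Int.mod_natCast m 10
      have hdivc : PySem.Int.floordiv (m : Int) 10 = ((m / 10 : Nat) : Int) := by
        exact_mod_cast PySem.Int.floordiv_natCast m 10
      have hdd : decDigits m = decDigits (m / 10) ++ [Nat.digitChar (m % 10)] := by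
        rw [decDigits]; simp [h10]
      have hvl := digitChar_val (m % 10) (Nat.mod_lt m (by omega))
      rw [hdd, lastPos_append_singleton, hvl]
      simp only [hge, dif_pos, hmod]
      by_cases hd : ((m % 10 : Nat) : Int) = d
      · simp only [hd, if_pos]
        rw [hdd] at hL
        simp only [List.length_append, List.length_cons, List.length_nil] at hL
        push_cast at hL ⊢
        omega
      · simp only [hd, if_neg, not_false_iff]
        rw [hdivc]
        apply ih (m / 10) (Nat.div_lt_self (by omega) (by omega))
          (by omega) (pos + 1)
        rw [hdd] at hL
        simp only [List.length_append, List.length_cons, List.length_nil] at hL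
        push_cast at hL ⊢
        omega

-- ===== VERDICT (by name: the statement is the Claim_ definition above) =====
theorem find_digit_position_spec : Claim_equal_find_digit_position := by
  intro number d _
  unfold Spec_find_digit_position find_digit_position find_digit_position_alt
  by_cases h : number < 10
  · rw [find_digit_position_loop]
    simp [h, not_le.mpr h]
  · have h0 : 0 ≤ number := by omega
    have hchars : PySem.Int.toChars number = decDigits number.toNat := by
      rw [PySem.Int.toChars]
      simp only [if_neg (by omega : ¬ number < 0)]
      exact toDigits_eq_decDigits number.toNat
    have hcast : ((number.toNat : Nat) : Int) = number := Int.toNat_of_nonneg h0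
    have hlen : PySem.Str.len (PySem.Int.toStr number)
        = 1 + ((decDigits number.toNat).length : Int) - 1 := by
      rw [PySem.Str.len_eq, PySem.Int.toList_toStr, hchars]
      omega
    have := loop_eq_lastPos number d number.toNat (by omega) 1 hlen
    rw [hcast] at this
    rw [this]
    simp only [h, if_neg, not_false_iff, hchars, lastPos]
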